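-- pv_equiv track=rewrite | github.com/kgodwinb44/Applied_Problem_Solving | # Taking steps.py | TakeSteps
-- ===== SOURCE A (Python) =====
-- def TakeSteps(nArray, nSteps, grid):
--     # Write your code here
--
--     x, y = 0, 0
--     i = 0
--
--     while i < nSteps:
--         move = grid[y][x]
--
--         if move == '>':
--             x += 1
--         elif move == '<':
--             x -= 1
--         elif move == '^':
--             y -= 1
--         elif move == 'v':
--             y += 1
--         i += 1
--     return nArray * y + x
-- ===== SOURCE B (Python) =====
-- # B: cycle detection on the deterministic walk — `seen` maps each position to its
-- # first-visit step (its insertion order doubling as the trail of positions); on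
-- # the first revisit jump straight to the final position with modular arithmetic
-- # instead of simulating all nSteps steps.
-- def TakeSteps(nArray, nSteps, grid):
--     delta = {'>': (1, 0), '<': (-1, 0), '^': (0, -1), 'v': (0, 1)}
--     x, y = 0, 0
--     seen = {}
--     step = 0
--     while step < nSteps:
--         p = (x, y)
--         if p in seen:
--             start = seen[p]
--             x, y = list(seen)[start + (nSteps - start) % (step - start)]
--             break
--         seen[p] = step
--         dx, dy = delta.get(grid[y][x], (0, 0))
--         x, y = x + dx, y + dy
--         step += 1
--     return nArray * y + x
-- ===== Notes on version B (the rewrite author's own statement) =====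
-- stated objective: alternative
-- what changed: B walks with cycle detection — a dictionary mapping each visited position to its first-visit step, whose insertion order doubles as the trail — and on the first revisit jumps straight to the final position with modular arithmetic instead of simulating all nSteps steps; it iterates only min(nSteps, number of distinct visited positions) times.
import Mathlib
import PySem

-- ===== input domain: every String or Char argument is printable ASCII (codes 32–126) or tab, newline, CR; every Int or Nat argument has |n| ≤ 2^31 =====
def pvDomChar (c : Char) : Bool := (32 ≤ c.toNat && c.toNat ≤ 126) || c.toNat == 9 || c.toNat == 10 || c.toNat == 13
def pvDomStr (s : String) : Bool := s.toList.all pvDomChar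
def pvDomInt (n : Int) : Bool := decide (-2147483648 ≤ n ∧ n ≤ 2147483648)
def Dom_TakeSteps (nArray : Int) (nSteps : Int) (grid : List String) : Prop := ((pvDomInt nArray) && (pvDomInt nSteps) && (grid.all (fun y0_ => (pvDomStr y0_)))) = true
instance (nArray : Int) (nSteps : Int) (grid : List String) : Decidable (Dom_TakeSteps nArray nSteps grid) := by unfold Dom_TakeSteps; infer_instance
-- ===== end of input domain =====

-- B replaces A's step-by-step simulation of all nSteps moves by cycle detection on
-- the deterministic walk (a visited-position dictionary whose insertion order doubles
-- as the trail) plus a modular jump to the final position (objective: a different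
-- algorithm; it iterates only until a position repeats).

-- ===== PORT A =====
-- one iteration of A's while body: read grid[y][x] (Python indexing; none = IndexError) and move
def TakeSteps.step (grid : List String) (p : Int × Int) : Option (Int × Int) :=
  (PySem.List.pyGet? grid p.2).bind fun row =>       -- grid[y]; none = IndexError
  (PySem.Str.pyGet? row p.1).map fun move =>         -- row[x]; none = IndexError
  if move = '>' then (p.1 + 1, p.2)
  else if move = '<' then (p.1 - 1, p.2)
  else if move = '^' then (p.1, p.2 - 1)
  else if move = 'v' then (p.1, p.2 + 1)
  else p

-- A's while loop: iterate the body nSteps times (none once an index error occurred)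
def TakeSteps.loop (grid : List String) : Nat → Int × Int → Option (Int × Int)
  | 0, p => some p
  | n + 1, p =>
    match TakeSteps.step grid p with
    | none => none
    | some q => TakeSteps.loop grid n q

def TakeSteps (nArray : Int) (nSteps : Int) (grid : List String) : Int :=
  match TakeSteps.loop grid nSteps.toNat (0, 0) with
  | some (x, y) => nArray * y + x
  | none => 0          -- unreachable under Pre_: Python raises IndexError here

-- ===== PORT B =====
-- Source B's local `delta` dictionary of moves
def altDelta : PySem.Dict Char (Int × Int) :=
  PySem.Dict.ofList [('>', (1, 0)), ('<', (-1, 0)), ('^', (0, -1)), ('v', (0, 1))]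

-- Source B's while loop: `seen` maps a position to the step of its first visit and its
-- key order is the trail (list(seen)); on a revisit jump via (nSteps - start) % period
def altLoop (nSteps : Int) (grid : List String) :
    Nat → Int → Int × Int → PySem.Dict (Int × Int) Int → Option (Int × Int)
  | 0, _, p, _ => some p
  | fuel + 1, step, p, seen =>
    match seen.get? p with
    | some start =>
        PySem.List.pyGet? seen.keys (start + PySem.Int.mod (nSteps - start) (step - start))
    | none =>
        match PySem.List.pyGet? grid p.2 with        -- grid[y]; none = IndexError
        | none => none
        | some row =>
          match PySem.Str.pyGet? row p.1 with        -- row[x]; none = IndexError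
          | none => none
          | some ch =>
            let d := altDelta.getD ch (0, 0)
            altLoop nSteps grid fuel (step + 1) (p.1 + d.1, p.2 + d.2) (seen.insert p step)

def TakeSteps_alt (nArray : Int) (nSteps : Int) (grid : List String) : Int :=
  match altLoop nSteps grid nSteps.toNat 0 (0, 0) PySem.Dict.empty with
  | some (x, y) => nArray * y + x
  | none => 0

-- ===== PRECONDITION & SPEC =====
-- the direction the cell at position p prescribes (none = p outside Python's index range)
def pvDir (grid : List String) (p : Int × Int) : Option (Int × Int) :=
  (PySem.List.pyGet? grid p.2).bind fun row =>
  (PySem.Str.pyGet? row p.1).map fun c =>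
    if c = '>' then (1, 0) else if c = '<' then (-1, 0)
    else if c = '^' then (0, -1) else if c = 'v' then (0, 1) else (0, 0)

-- the first k positions of the walk from p are all inside the index range
def pvSafe (grid : List String) : Nat → Int × Int → Bool
  | 0, _ => true
  | k + 1, p =>
    match pvDir grid p with
    | none => false
    | some d => pvSafe grid k (p.1 + d.1, p.2 + d.2)

-- one more than 4·rows·maxRowLen, an upper bound on the count of valid (x, y)
-- index pairs (each row of length L admits 2L x-indices, each row 2 y-indices)
def pvCap (grid : List String) : Nat :=
  4 * grid.length * (grid.map (fun s => s.toList.length)).foldr max 0 + 1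

-- Pre_ holds EXACTLY when Python's A returns rather than raising IndexError: A's domain
-- is walk-reachability (the walk from (0, 0) must stay inside Python's index range for
-- every read), which no condition can state without following the walk; the check is
-- capped at pvCap grid steps — a walk whose first pvCap positions are all valid has
-- revisited a position (there are fewer than pvCap valid index pairs), hence is periodic
-- and stays valid forever — so NOTHING A returns on is excluded and nothing A raises on
-- is admitted.  Pre_ does not ease the proof: the ports are proved equal on ALL inputs
-- (ports_agree below); Pre_ only marks where the Pythons return at all.
def Pre_TakeSteps (nArray : Int) (nSteps : Int) (grid : List String) : Prop :=
  pvSafe grid (min nSteps.toNat (pvCap grid)) (0, 0) = true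

instance (nArray : Int) (nSteps : Int) (grid : List String) : Decidable (Pre_TakeSteps nArray nSteps grid) := by
  unfold Pre_TakeSteps; infer_instance

def pvWitness_TakeSteps : Int × Int × List String := (3, 7, ["v.", "^."])

def Spec_TakeSteps (nArray : Int) (nSteps : Int) (grid : List String) (out : Int) : Prop := out = TakeSteps_alt nArray nSteps grid
instance (nArray : Int) (nSteps : Int) (grid : List String) (out : Int) : Decidable (Spec_TakeSteps nArray nSteps grid out) := by unfold Spec_TakeSteps; infer_instance

-- ===== CLAIM (what is proved, stated in full; the proofs are below) =====
def Claim_equal_TakeSteps : Prop := ∀ (nArray : Int) (nSteps : Int) (grid : List String), Dom_TakeSteps nArray nSteps grid → Pre_TakeSteps nArray nSteps grid → Spec_TakeSteps nArray nSteps grid (TakeSteps nArray nSteps grid)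

-- ===== LEMMAS AND PROOFS =====

theorem delta_mk : altDelta
    = PySem.Dict.mk [('>', (1, 0)), ('<', (-1, 0)), ('^', (0, -1)), ('v', (0, 1))] := by decide

-- A's if-chain step, phrased through Source B's delta.get: one move adds the delta
theorem step_delta (grid : List String) (p : Int × Int) :
    TakeSteps.step grid p
      = match PySem.List.pyGet? grid p.2 with
        | none => none
        | some row =>
          match PySem.Str.pyGet? row p.1 with
          | none => none
          | some ch =>
            some (p.1 + (altDelta.getD ch (0, 0)).1, p.2 + (altDelta.getD ch (0, 0)).2) := by
  unfold TakeSteps.step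
  cases h1 : PySem.List.pyGet? grid p.2 with
  | none => rfl
  | some row =>
    simp only [Option.bind_some]
    cases h2 : PySem.Str.pyGet? row p.1 with
    | none => rfl
    | some move =>
      simp only [Option.map_some, Option.some.injEq]
      rw [PySem.Dict.getD_eq_get?_getD, delta_mk]
      simp only [PySem.Dict.get?_mk_cons, beq_iff_eq]
      split_ifs <;> simp_all [eq_comm, sub_eq_add_neg, PySem.Dict.get?]

theorem loop_succ (grid : List String) (n : Nat) (p : Int × Int) :
    TakeSteps.loop grid (n + 1) p = (TakeSteps.step grid p).bind (TakeSteps.loop grid n) := by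
  cases h : TakeSteps.step grid p <;> simp [TakeSteps.loop, h]

theorem loop_add (grid : List String) (a b : Nat) (p : Int × Int) :
    TakeSteps.loop grid (a + b) p = (TakeSteps.loop grid a p).bind (TakeSteps.loop grid b) := by
  induction a generalizing p with
  | zero => simp [TakeSteps.loop]
  | succ a ih =>
    have : a + 1 + b = (a + b) + 1 := by omega
    rw [this, loop_succ, loop_succ]
    cases h : TakeSteps.step grid p <;> simp [ih]

theorem loop_succ_right (grid : List String) (n : Nat) (p : Int × Int) :
    TakeSteps.loop grid (n + 1) p = (TakeSteps.loop grid n p).bind (TakeSteps.step grid) := by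
  rw [loop_add grid n 1 p]
  cases h : TakeSteps.loop grid n p with
  | none => simp
  | some q =>
    simp only [Option.bind_some]
    cases hs : TakeSteps.step grid q <;> simp [TakeSteps.loop, hs]

theorem loop_period (grid : List String) (p0 q : Int × Int) (s per : Nat) (hper : 0 < per)
    (hs : TakeSteps.loop grid s p0 = some q) (hp : TakeSteps.loop grid per q = some q) :
    ∀ m, TakeSteps.loop grid (s + m) p0 = TakeSteps.loop grid (s + m % per) p0 := by
  intro m
  induction m using Nat.strong_induction_on with
  | _ m ih =>
    rcases Nat.lt_or_ge m per with hm | hm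
    · rw [Nat.mod_eq_of_lt hm]
    · have h1 : s + m = (s + per) + (m - per) := by omega
      have h2 : TakeSteps.loop grid (s + per) p0 = some q := by
        rw [loop_add, hs]; simpa using hp
      have h3 : TakeSteps.loop grid (s + m) p0 = TakeSteps.loop grid (s + (m - per)) p0 := by
        rw [h1, loop_add, h2, loop_add, hs]
      have h4 : m % per = (m - per) % per := by
        conv_lhs => rw [← Nat.sub_add_cancel hm]
        rw [Nat.add_mod_right]
      rw [h3, h4]
      exact ih (m - per) (by omega)

-- invariant of Source B's while loop against A's plain iteration: seen's key list is the
-- trail of the walk's first seen.size positions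
theorem alt_loop_eq (grid : List String) (nSteps : Int) :
    ∀ (fuel : Nat) (i : Int) (p : Int × Int) (seen : PySem.Dict (Int × Int) Int),
      i = (seen.keys.length : Int) →
      seen.keys.length + fuel = nSteps.toNat →
      (∀ k, k < seen.keys.length → TakeSteps.loop grid k (0, 0) = some (seen.keys.getD k (0, 0))) →
      TakeSteps.loop grid seen.keys.length (0, 0) = some p →
      (∀ q j, seen.get? q = some j → ∃ k : Nat, j = (k : Int) ∧ k < seen.keys.length ∧ seen.keys.getD k (0, 0) = q) →
      altLoop nSteps grid fuel i p seen = TakeSteps.loop grid nSteps.toNat (0, 0) := by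
  intro fuel
  induction fuel with
  | zero =>
    intro i p seen hi hfuel hvis hcur hseen
    have : seen.keys.length = nSteps.toNat := by omega
    rw [altLoop, ← this, hcur]
  | succ fuel ih =>
    intro i p seen hi hfuel hvis hcur hseen
    set n := seen.keys.length with hn
    have hN : n + (fuel + 1) = nSteps.toNat := hfuel
    have hnS : nSteps = (nSteps.toNat : Int) := by
      have : 0 < nSteps.toNat := by omega
      omega
    rw [altLoop]
    cases hget : seen.get? p with
    | some j =>
      obtain ⟨k, hj, hk, htrk⟩ := hseen p j hget
      have hidx : i - j = ((n - k : Nat) : Int) := by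
        rw [hi, hj]; omega
      have hm : nSteps - j = ((nSteps.toNat - k : Nat) : Int) := by
        rw [hj, hnS]; omega
      have hper : 0 < n - k := by omega
      simp only [hidx, hm, PySem.Int.mod_natCast]
      have hrem : j + ((((nSteps.toNat - k) % (n - k) : Nat)) : Int)
          = ((k + (nSteps.toNat - k) % (n - k) : Nat) : Int) := by
        rw [hj]; push_cast; ring
      rw [hrem, PySem.List.pyGet?_natCast]
      have hlt : k + (nSteps.toNat - k) % (n - k) < n := by
        have := Nat.mod_lt (nSteps.toNat - k) hper
        omega
      have hs : TakeSteps.loop grid k (0, 0) = some p := by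
        have := hvis k hk; rwa [htrk] at this
      have hcyc : TakeSteps.loop grid (n - k) p = some p := by
        have h1 : TakeSteps.loop grid (k + (n - k)) (0, 0) = some p := by
          have : k + (n - k) = n := by omega
          rw [this]; exact hcur
        rw [loop_add, hs] at h1
        simpa using h1
      have hper2 := loop_period grid (0, 0) p k (n - k) hper hs hcyc (nSteps.toNat - k)
      have hR : TakeSteps.loop grid nSteps.toNat (0, 0)
          = some (seen.keys.getD (k + (nSteps.toNat - k) % (n - k)) (0, 0)) := by
        have hNk : nSteps.toNat = k + (nSteps.toNat - k) := by omega
        conv_lhs => rw [hNk]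
        rw [hper2]
        exact hvis _ hlt
      rw [hR, List.getD_eq_getElem?_getD, List.getElem?_eq_getElem (by omega)]
      simp
    | none =>
      have hcont : seen.contains p = false := (PySem.Dict.get?_eq_none_iff_contains seen p).mp hget
      have hkeys : (seen.insert p i).keys = seen.keys ++ [p] :=
        PySem.Dict.keys_insert_of_not_contains seen i hcont
      cases hrow : PySem.List.pyGet? grid p.2 with
      | none =>
        have hstep : TakeSteps.step grid p = none := by
          rw [step_delta]; simp only [hrow]
        have : TakeSteps.loop grid nSteps.toNat (0, 0) = none := by
          rw [← hN, loop_add, hcur]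
          simp [loop_succ, hstep]
        simp only [this]
      | some row =>
        cases hch : PySem.Str.pyGet? row p.1 with
        | none =>
          have hstep : TakeSteps.step grid p = none := by
            rw [step_delta]; simp only [hrow, hch]
          have : TakeSteps.loop grid nSteps.toNat (0, 0) = none := by
            rw [← hN, loop_add, hcur]
            simp [loop_succ, hstep]
          simp only [hch, this]
        | some ch =>
          have hstep : TakeSteps.step grid p
              = some (p.1 + (altDelta.getD ch (0, 0)).1, p.2 + (altDelta.getD ch (0, 0)).2) := by
            rw [step_delta]; simp only [hrow, hch]
          have hlen : (seen.insert p i).keys.length = n + 1 := by simp [hkeys, hn]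
          simp only [hch]
          apply ih (i + 1) _ (seen.insert p i)
          · rw [hlen, hi]; push_cast; ring
          · omega
          · intro k hk
            rw [hlen] at hk
            rw [hkeys]
            rcases Nat.lt_or_ge k n with h | h
            · rw [List.getD_append _ _ _ _ (by omega)]
              exact hvis k h
            · have hkn : k = n := by omega
              have hp' : (seen.keys ++ [p]).getD k (0, 0) = p := by
                rw [List.getD_eq_getElem?_getD, hkn, hn, List.getElem?_append_right (by omega)]
                simp
              rw [hp', hkn]; exact hcur
          · rw [hlen, loop_succ_right, hcur]
            simpa using hstep
          · intro q' j' hq'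
            rw [PySem.Dict.get?_insert] at hq'
            by_cases hqp : q' = p
            · rw [if_pos hqp] at hq'
              have hji : i = j' := Option.some.inj hq'
              refine ⟨n, by omega, by rw [hlen]; omega, ?_⟩
              rw [hqp, hkeys, List.getD_eq_getElem?_getD, hn, List.getElem?_append_right (by omega)]
              simp
            · rw [if_neg hqp] at hq'
              obtain ⟨k, hj, hk, htr⟩ := hseen q' j' hq'
              exact ⟨k, hj, by rw [hlen]; omega,
                by rw [hkeys, List.getD_append _ _ _ _ (by omega)]; exact htr⟩

theorem ports_agree (nArray nSteps : Int) (grid : List String) :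
    TakeSteps nArray nSteps grid = TakeSteps_alt nArray nSteps grid := by
  unfold TakeSteps TakeSteps_alt
  rw [alt_loop_eq grid nSteps nSteps.toNat 0 (0, 0) PySem.Dict.empty]
  · simp [PySem.Dict.keys]
  · simp [PySem.Dict.keys, PySem.Dict.empty]
  · intro k hk; simp [PySem.Dict.keys, PySem.Dict.empty] at hk
  · simp [PySem.Dict.keys, PySem.Dict.empty, TakeSteps.loop]
  · intro q j hq; simp [PySem.Dict.get?_empty] at hq

-- ===== VERDICT (by name: the statement is the Claim_ definition above) =====
theorem TakeSteps_spec : Claim_equal_TakeSteps := by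
  intro nArray nSteps grid _ _
  exact ports_agree nArray nSteps grid
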